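-- pv_equiv track=rewrite | github.com/Darshan-AS/Cracking-The-Coding-Interview | 5. Bit Manipulation/8_Draw_Line.py | draw_line
-- ===== SOURCE A (Python) =====
-- def draw_line(screen, width, x1, x2, y):
--     start_offset, end_offset = x1 % 8, x2 % 8
--     start_full_byte, end_full_byte = x1 // 8, x2 // 8
--
--     if start_full_byte == end_full_byte:
--         screen[(width // 8) * y + (x1 // 8)] |= ((1 << (end_offset - start_offset + 1)) - 1) << (8 - end_offset - 1)
--         return screen
--
--     for i in range(start_full_byte + 1, end_full_byte):
--         screen[(width // 8) * y + i] = 255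
--
--     screen[(width // 8) * y + start_full_byte] |= ((1 << (8 - start_offset)) - 1)
--     screen[(width // 8) * y + end_full_byte] |= 255 ^ ((1 << (8 - end_offset - 1)) - 1)
--     return screen
-- ===== SOURCE B (Python) =====
-- def draw_line(screen, width, x1, x2, y):
--     if x1 > x2:
--         raise ValueError("x1 must be <= x2")
--     row = (width // 8) * y
--     for x in range(x1, x2 + 1):
--         screen[row + x // 8] |= 1 << (7 - x % 8)
--     return screen
-- ===== Notes on version B (the rewrite author's own statement) =====
-- stated objective: simpler
-- what changed: A's byte-level case analysis (single-byte mask, middle-run assignment of 255, separate start/end masks) is replaced by a per-pixel pass that ORs one bit per pixel; B validates x1 <= x2 up front. Pre_ additionally requires the entries at the line's MIDDLE bytes to be byte values 0-255 (screen is a byte buffer): on out-of-byte middle entries A's assignment of 255 discards bits that B's per-pixel OR preserves.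
-- outside the precondition, e.g. on draw_line([0, 0, 0], 8, 8, 0, 0): A returns [128, 255, 0], B raises ValueError; on draw_line([0, 300, 0], 24, 0, 23, 0): A returns [255, 255, 255], B returns [255, 511, 255]
import Mathlib
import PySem

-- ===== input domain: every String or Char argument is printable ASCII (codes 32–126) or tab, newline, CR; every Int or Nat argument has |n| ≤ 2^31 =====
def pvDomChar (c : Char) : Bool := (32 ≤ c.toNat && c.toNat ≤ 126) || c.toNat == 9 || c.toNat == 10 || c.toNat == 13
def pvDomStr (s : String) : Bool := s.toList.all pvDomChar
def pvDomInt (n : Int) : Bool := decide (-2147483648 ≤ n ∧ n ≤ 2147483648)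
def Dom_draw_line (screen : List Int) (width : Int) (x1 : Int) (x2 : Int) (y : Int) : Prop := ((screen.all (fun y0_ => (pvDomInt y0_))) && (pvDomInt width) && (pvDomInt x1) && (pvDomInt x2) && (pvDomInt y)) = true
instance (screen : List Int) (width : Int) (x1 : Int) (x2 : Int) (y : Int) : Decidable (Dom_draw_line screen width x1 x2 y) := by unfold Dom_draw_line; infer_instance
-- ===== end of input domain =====

-- B replaces A's byte-level case analysis (single-byte mask / middle 255-run / two end masks) by a
-- per-PIXEL pass that ORs one bit per pixel; objective: simpler.
-- Both A and B mutate `screen` in place in Python; the equivalence proved here is about the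
-- returned list (B performs writes pixel by pixel instead of byte by byte).

-- ===== PORT A =====
def draw_line (screen : List Int) (width : Int) (x1 : Int) (x2 : Int) (y : Int) : List Int :=
  let start_offset := PySem.Int.mod x1 8
  let end_offset := PySem.Int.mod x2 8
  let start_full_byte := PySem.Int.floordiv x1 8
  let end_full_byte := PySem.Int.floordiv x2 8
  if start_full_byte = end_full_byte then
    -- screen[(width // 8) * y + (x1 // 8)] |= ((1 << (e - s + 1)) - 1) << (8 - e - 1)
    let i := PySem.Int.floordiv width 8 * y + start_full_byte
    PySem.List.pySetD screen i
      (PySem.Int.bor (PySem.List.pyGetD screen i 0)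
        ((((1 : Int) <<< (end_offset - start_offset + 1).toNat) - 1) <<< (8 - end_offset - 1).toNat))
  else
    -- for i in range(start_full_byte + 1, end_full_byte): screen[(width // 8) * y + i] = 255
    let s1 := (PySem.List.pyRange (start_full_byte + 1) end_full_byte 1).foldl
      (fun scr i => PySem.List.pySetD scr (PySem.Int.floordiv width 8 * y + i) 255) screen
    -- screen[(width // 8) * y + start_full_byte] |= ((1 << (8 - s)) - 1)
    let is := PySem.Int.floordiv width 8 * y + start_full_byte
    let s2 := PySem.List.pySetD s1 is
      (PySem.Int.bor (PySem.List.pyGetD s1 is 0) (((1 : Int) <<< (8 - start_offset).toNat) - 1))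
    -- screen[(width // 8) * y + end_full_byte] |= 255 ^ ((1 << (8 - e - 1)) - 1)
    let ie := PySem.Int.floordiv width 8 * y + end_full_byte
    PySem.List.pySetD s2 ie
      (PySem.Int.bor (PySem.List.pyGetD s2 ie 0)
        (PySem.Int.bxor 255 (((1 : Int) <<< (8 - end_offset - 1).toNat) - 1)))

-- ===== PORT B =====
def draw_line_alt (screen : List Int) (width : Int) (x1 : Int) (x2 : Int) (y : Int) : List Int :=
  -- 'if x1 > x2: raise ValueError' — the raise is outside Pre_; the guard only makes the port total
  if x2 < x1 then screen
  else
    let row := PySem.Int.floordiv width 8 * y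
    -- for x in range(x1, x2 + 1): screen[row + x // 8] |= 1 << (7 - x % 8)
    (PySem.List.pyRange x1 (x2 + 1) 1).foldl
      (fun scr x =>
        PySem.List.pySetD scr (row + PySem.Int.floordiv x 8)
          (PySem.Int.bor (PySem.List.pyGetD scr (row + PySem.Int.floordiv x 8) 0)
            ((1 : Int) <<< (7 - PySem.Int.mod x 8).toNat)))
      screen

-- ===== PRECONDITION & SPEC =====
-- Pre_ excludes: x1 > x2 (an empty line, on which A raises ValueError from a negative shift or
-- stray-writes its two end masks while B rejects it with ValueError); touched byte indices outside
-- [-len(screen), len(screen)), on which A raises IndexError; and screens whose entry at a MIDDLE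
-- byte of the line lies outside 0..255 — screen is a byte buffer, and on such entries A's
-- middle-byte assignment of 255 discards bits that B's per-pixel OR preserves.
def Pre_draw_line (screen : List Int) (width : Int) (x1 : Int) (x2 : Int) (y : Int) : Prop :=
  x1 ≤ x2 ∧
  -(screen.length : Int) ≤ PySem.Int.floordiv width 8 * y + PySem.Int.floordiv x1 8 ∧
  PySem.Int.floordiv width 8 * y + PySem.Int.floordiv x2 8 < screen.length ∧
  ∀ b ∈ PySem.List.pyRange (PySem.Int.floordiv x1 8 + 1) (PySem.Int.floordiv x2 8) 1,
    0 ≤ PySem.List.pyGetD screen (PySem.Int.floordiv width 8 * y + b) 0 ∧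
    PySem.List.pyGetD screen (PySem.Int.floordiv width 8 * y + b) 0 < 256
instance (screen : List Int) (width : Int) (x1 : Int) (x2 : Int) (y : Int) : Decidable (Pre_draw_line screen width x1 x2 y) := by unfold Pre_draw_line; infer_instance

def pvWitness_draw_line : List Int × Int × Int × Int × Int := ([0, 0], 8, 2, 5, 1)

def Spec_draw_line (screen : List Int) (width : Int) (x1 : Int) (x2 : Int) (y : Int) (out : List Int) : Prop := out = draw_line_alt screen width x1 x2 y
instance (screen : List Int) (width : Int) (x1 : Int) (x2 : Int) (y : Int) (out : List Int) : Decidable (Spec_draw_line screen width x1 x2 y out) := by unfold Spec_draw_line; infer_instance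

-- ===== CLAIM (what is proved, stated in full; the proofs are below) =====
def Claim_equal_draw_line : Prop := ∀ (screen : List Int) (width : Int) (x1 : Int) (x2 : Int) (y : Int), Dom_draw_line screen width x1 x2 y → Pre_draw_line screen width x1 x2 y → Spec_draw_line screen width x1 x2 y (draw_line screen width x1 x2 y)

-- ===== LEMMAS AND PROOFS =====

-- an intermediate, byte-at-a-time formulation used only by the proofs: the same writes as A,
-- performed left to right with one clamped mask per byte (middle bytes assigned 255)
def drawBytes (screen : List Int) (width : Int) (x1 : Int) (x2 : Int) (y : Int) : List Int :=
  if x2 < x1 then screen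
  else
    (PySem.List.pyRange (x1 / 8) (x2 / 8 + 1) 1).foldl
      (fun scr b =>
        if x1 / 8 < b ∧ b < x2 / 8 then
          PySem.List.pySetD scr (width / 8 * y + b) 255
        else
          PySem.List.pySetD scr (width / 8 * y + b)
            (PySem.Int.bor (PySem.List.pyGetD scr (width / 8 * y + b) 0)
              ((((1 : Int) <<< (min x2 (8 * b + 7) - max x1 (8 * b) + 1).toNat) - 1) <<<
                (7 - (min x2 (8 * b + 7)) % 8).toNat)))
      screen

-- B's per-pixel step and the per-byte OR step, named for the lemmas below
def pixF (row : Int) (scr : List Int) (x : Int) : List Int :=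
  PySem.List.pySetD scr (row + x / 8)
    (PySem.Int.bor (PySem.List.pyGetD scr (row + x / 8) 0) ((1 : Int) <<< (7 - x % 8).toNat))

def byteF (row : Int) (x1 : Int) (x2 : Int) (scr : List Int) (b : Int) : List Int :=
  PySem.List.pySetD scr (row + b)
    (PySem.Int.bor (PySem.List.pyGetD scr (row + b) 0)
      ((((1 : Int) <<< (min x2 (8 * b + 7) - max x1 (8 * b) + 1).toNat) - 1) <<<
        (7 - (min x2 (8 * b + 7)) % 8).toNat))

-- Python's index normalisation (wraparound for negative indices), as pyIdx? computes it
def pvPos (n : Nat) (i : Int) : Nat := if 0 ≤ i then i.toNat else n - (-i).toNat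

theorem pvPos_lt (n : Nat) (i : Int) (h : PySem.Raise.InRange n i) : pvPos n i < n := by
  obtain ⟨h1, h2⟩ := h
  unfold pvPos
  split_ifs <;> omega

theorem pySetD_inRange (xs : List Int) (i : Int) (v : Int) (h : PySem.Raise.InRange xs.length i) :
    PySem.List.pySetD xs i v = xs.set (pvPos xs.length i) v := by
  obtain ⟨h1, h2⟩ := h
  unfold pvPos PySem.List.pySetD PySem.List.pySet? PySem.List.pyIdx?
  split_ifs <;> simp_all

theorem pyGetD_inRange (xs : List Int) (i : Int) (d : Int) (h : PySem.Raise.InRange xs.length i) :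
    PySem.List.pyGetD xs i d = (xs[pvPos xs.length i]?).getD d := by
  obtain ⟨h1, h2⟩ := h
  unfold pvPos PySem.List.pyGetD PySem.List.pyGet? PySem.List.pyIdx?
  split_ifs <;> simp_all

-- bitwise facts on byte-sized values
theorem shl_nonneg (m : Nat) : 0 ≤ (1 : Int) <<< m := by
  rw [Int.shiftLeft_eq]; positivity

theorem pv_or_mod_two (a b : Nat) : (a ||| b) % 2 = a % 2 ||| b % 2 := by
  have h := Nat.testBit_or a b 0
  simp only [Nat.testBit_zero] at h
  rcases Nat.mod_two_eq_zero_or_one a with h1|h1 <;>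
    rcases Nat.mod_two_eq_zero_or_one b with h2|h2 <;>
      rcases Nat.mod_two_eq_zero_or_one (a ||| b) with h3|h3 <;>
        simp [h1, h2, h3] at h ⊢

theorem pv_add_eq_or (x : Nat) : ∀ y : Nat, x &&& y = 0 → x + y = x ||| y := by
  induction x using Nat.strong_induction_on with
  | _ x ih =>
    intro y h
    rcases Nat.eq_zero_or_pos x with hx | hx
    · simp [hx]
    · have hdiv : x / 2 &&& y / 2 = 0 := by rw [← Nat.and_div_two, h]
      have hmod : ¬(x % 2 = 1 ∧ y % 2 = 1) := by
        have := Nat.testBit_and x y 0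
        simp only [Nat.testBit_zero, h] at this
        rintro ⟨h1, h2⟩
        simp [h1, h2] at this
      have hrec := ih (x / 2) (by omega) (y / 2) hdiv
      have hor2 : (x ||| y) / 2 = x / 2 ||| y / 2 := Nat.or_div_two
      have hmod2 : (x ||| y) % 2 = x % 2 ||| y % 2 := pv_or_mod_two x y
      have hv : x % 2 ||| y % 2 = x % 2 + y % 2 := by
        rcases Nat.mod_two_eq_zero_or_one x with h1|h1 <;>
          rcases Nat.mod_two_eq_zero_or_one y with h2|h2 <;> rw [h1, h2] <;>
            first | rfl | (exfalso; exact hmod ⟨h1, h2⟩)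
      omega

theorem pv_sub_and (n m : Nat) : n - (n &&& m) = Nat.ldiff n m := by
  have h0 : (n &&& m) &&& Nat.ldiff n m = 0 := by
    apply Nat.eq_of_testBit_eq; intro i
    simp [Nat.testBit_and, Nat.testBit_ldiff]
    tauto
  have h1 : (n &&& m) ||| Nat.ldiff n m = n := by
    apply Nat.eq_of_testBit_eq; intro i
    simp only [Nat.testBit_or, Nat.testBit_and, Nat.testBit_ldiff]
    cases n.testBit i <;> cases m.testBit i <;> rfl
  have h2 := pv_add_eq_or (n &&& m) (Nat.ldiff n m) h0
  omega

theorem pv_ldiff_or (a b c : Nat) : Nat.ldiff a (b ||| c) = Nat.ldiff (Nat.ldiff a b) c := by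
  apply Nat.eq_of_testBit_eq; intro i
  simp only [Nat.testBit_ldiff, Nat.testBit_or]
  cases a.testBit i <;> cases b.testBit i <;> cases c.testBit i <;> rfl

-- OR is associative when the two masks are nonnegative (the accumulated value may be any int)
theorem bor3 (a b c : Int) (hb : 0 ≤ b) (hc : 0 ≤ c) :
    PySem.Int.bor (PySem.Int.bor a b) c = PySem.Int.bor a (PySem.Int.bor b c) := by
  by_cases ha : 0 ≤ a
  · rw [PySem.Int.bor_of_nonneg ha hb, PySem.Int.bor_of_nonneg hb hc,
      PySem.Int.bor_of_nonneg (Int.natCast_nonneg _) hc,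
      PySem.Int.bor_of_nonneg ha (Int.natCast_nonneg _)]
    simp [Nat.lor_assoc]
  · unfold PySem.Int.bor
    simp only [if_neg ha, if_pos hb, if_pos hc]
    rw [if_neg (by omega : ¬(0:Int) ≤ -↑((-a - 1).toNat - ((-a - 1).toNat &&& b.toNat)) - 1),
      if_pos (by positivity : (0:Int) ≤ ((b.toNat ||| c.toNat : Nat) : Int))]
    rw [show ((-(-↑((-a - 1).toNat - ((-a - 1).toNat &&& b.toNat)) - 1) - 1 : Int)).toNat
        = (-a - 1).toNat - ((-a - 1).toNat &&& b.toNat) from by omega]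
    rw [show ((((b.toNat ||| c.toNat : Nat)) : Int)).toNat = b.toNat ||| c.toNat from by omega]
    have h := pv_ldiff_or ((-a - 1).toNat) b.toNat c.toNat
    rw [← pv_sub_and, ← pv_sub_and, ← pv_sub_and] at h
    rw [h]

theorem bor_255 (m : Int) (h0 : 0 ≤ m) (h1 : m < 256) : PySem.Int.bor 255 m = 255 := by
  rw [PySem.Int.bor_of_nonneg (by norm_num) h0]
  have h2 : m.toNat < 256 := by omega
  have h3 : (255 : Nat) ||| m.toNat < 256 := Nat.or_lt_two_pow (n := 8) (by norm_num) h2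
  have h4 : (255 : Nat) ≤ 255 ||| m.toNat := Nat.left_le_or
  have h5 : Int.toNat 255 = 255 := rfl
  rw [h5]
  omega

theorem bor_lt_256 (a b : Int) (ha : 0 ≤ a) (ha' : a < 256) (hb : 0 ≤ b) (hb' : b < 256) :
    0 ≤ PySem.Int.bor a b ∧ PySem.Int.bor a b < 256 := by
  rw [PySem.Int.bor_of_nonneg ha hb]
  have h3 : a.toNat ||| b.toNat < 256 := Nat.or_lt_two_pow (n := 8) (by omega) (by omega)
  constructor
  · exact Int.natCast_nonneg _
  · exact_mod_cast h3

-- the clamped byte mask ((1 <<< u) - 1) <<< d with u + d ≤ 8 is a byte value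
theorem maskBound (u d : Nat) (h : u + d ≤ 8) :
    0 ≤ (((1 : Int) <<< u) - 1) <<< d ∧ (((1 : Int) <<< u) - 1) <<< d < 256 := by
  have hu : u ≤ 8 := by omega
  have hd : d ≤ 8 := by omega
  interval_cases u <;> interval_cases d <;> first | (exfalso; omega) | decide

-- adding the next-higher bit to a byte mask extends the run by one
theorem bit_or_mask (d k : Nat) (h : d + k + 2 ≤ 8) :
    PySem.Int.bor ((1 : Int) <<< (d + (k + 1))) ((((1 : Int) <<< (k + 1)) - 1) <<< d)
      = (((1 : Int) <<< (k + 2)) - 1) <<< d := by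
  have hd : d ≤ 6 := by omega
  have hk : k ≤ 6 := by omega
  interval_cases d <;> interval_cases k <;> first | (exfalso; omega) | decide

theorem startmask_bound (k : Nat) (hk : k ≤ 8) :
    0 ≤ ((1 : Int) <<< k) - 1 ∧ ((1 : Int) <<< k) - 1 < 256 := by
  rw [Int.shiftLeft_eq]
  have h2 : (2 : Int) ^ k ≤ 2 ^ 8 := pow_le_pow_right₀ (by norm_num) hk
  have h3 : (0 : Int) < 2 ^ k := by positivity
  constructor
  · omega
  · have : (2 : Int) ^ 8 = 256 := by omega
    omega

-- ORing the pixels of one byte, highest-to-last: the chunk x ∈ [hi-k, hi] of byte b collapses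
-- to a single OR of the corresponding mask
theorem chunk (j b hi : Int) :
    ∀ (k : Nat) (lo : Int) (scr : List Int), lo = hi - (k : Int) → 8 * b ≤ lo → hi ≤ 8 * b + 7 →
      PySem.Raise.InRange scr.length j →
      (PySem.List.pyRange lo (hi + 1) 1).foldl
        (fun sc x =>
          PySem.List.pySetD sc j
            (PySem.Int.bor (PySem.List.pyGetD sc j 0) ((1 : Int) <<< (7 - x % 8).toNat))) scr
      = PySem.List.pySetD scr j
          (PySem.Int.bor (PySem.List.pyGetD scr j 0)
            ((((1 : Int) <<< (k + 1)) - 1) <<< (7 - hi % 8).toNat)) := by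
  intro k
  induction k with
  | zero =>
    intro lo scr hloeq h8 h7 hIR
    subst hloeq
    simp only [Int.shiftLeft_natCast_right]
    rw [show hi - ((0 : Nat) : Int) = hi by simp, PySem.List.pyRange_one_singleton,
      List.foldl_cons, List.foldl_nil,
      show (((1 : Int) <<< ((0 : Nat) + 1)) - 1) = 1 from by decide]
  | succ k ih =>
    intro lo scr hloeq h8 h7 hIR
    subst hloeq
    simp only [Int.shiftLeft_natCast_right] at ih ⊢
    have hlt : hi - ((k + 1 : Nat) : Int) < hi + 1 := by push_cast; omega
    rw [PySem.List.pyRange_one_cons hlt, List.foldl_cons,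
      show hi - ((k + 1 : Nat) : Int) + 1 = hi - ((k : Nat) : Int) by push_cast; ring]
    rw [ih (hi - ((k : Nat) : Int)) (PySem.List.pySetD scr j
        (PySem.Int.bor (PySem.List.pyGetD scr j 0)
          ((1 : Int) <<< (7 - (hi - ((k + 1 : Nat) : Int)) % 8).toNat)))
      rfl (by push_cast at h8 ⊢; omega) h7 (by rw [PySem.List.length_pySetD]; exact hIR)]
    have hp : pvPos scr.length j < scr.length := pvPos_lt _ _ hIR
    have hget : PySem.List.pyGetD (PySem.List.pySetD scr j
        (PySem.Int.bor (PySem.List.pyGetD scr j 0)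
          ((1 : Int) <<< (7 - (hi - ((k + 1 : Nat) : Int)) % 8).toNat))) j 0
        = PySem.Int.bor (PySem.List.pyGetD scr j 0)
            ((1 : Int) <<< (7 - (hi - ((k + 1 : Nat) : Int)) % 8).toNat) := by
      rw [pySetD_inRange scr j _ hIR,
        pyGetD_inRange _ j 0 (by rw [List.length_set]; exact hIR)]
      simp [List.getElem?_set_self hp]
    rw [hget, pySetD_inRange scr j _ hIR,
      pySetD_inRange _ j _ (by rw [List.length_set]; exact hIR),
      pySetD_inRange scr j _ hIR]
    simp only [List.length_set]
    rw [List.set_set]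
    congr 1
    have hmk : 0 ≤ (((1 : Int) <<< (k + 1)) - 1) <<< (7 - hi % 8).toNat :=
      (maskBound (k + 1) (7 - hi % 8).toNat (by omega)).1
    rw [bor3 _ _ _ (shl_nonneg _) hmk]
    congr 1
    rw [show (7 - (hi - ((k + 1 : Nat) : Int)) % 8).toNat = (7 - hi % 8).toNat + (k + 1) from by omega]
    rw [bit_or_mask (7 - hi % 8).toNat k (by omega)]

-- byteF keeps every entry a byte and the length unchanged
theorem byteF_length (row x1 x2 b : Int) (scr : List Int) :
    (byteF row x1 x2 scr b).length = scr.length := by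
  simp only [byteF, PySem.List.length_pySetD]

-- reading/writing through a possibly negative index: collision characterisation
theorem pyGetD_pos_eq (xs : List Int) (i j d : Int)
    (hi : PySem.Raise.InRange xs.length i) (hj : PySem.Raise.InRange xs.length j)
    (hp : pvPos xs.length i = pvPos xs.length j) :
    PySem.List.pyGetD xs i d = PySem.List.pyGetD xs j d := by
  rw [pyGetD_inRange _ _ _ hi, pyGetD_inRange _ _ _ hj, hp]

theorem pyGetD_pySetD_wrap (xs : List Int) (i j w d : Int)
    (hi : PySem.Raise.InRange xs.length i) (hj : PySem.Raise.InRange xs.length j) :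
    PySem.List.pyGetD (PySem.List.pySetD xs i w) j d
      = if pvPos xs.length i = pvPos xs.length j then w else PySem.List.pyGetD xs j d := by
  rw [pySetD_inRange _ _ _ hi, pyGetD_inRange _ _ d (by rw [List.length_set]; exact hj),
    pyGetD_inRange _ _ _ hj]
  simp only [List.length_set]
  by_cases h : pvPos xs.length i = pvPos xs.length j
  · rw [if_pos h, ← h, List.getElem?_set_self (pvPos_lt _ _ hi)]
    rfl
  · rw [if_neg h, List.getElem?_set_ne h]

-- the per-pixel fold over [x1, x2] equals the per-byte fold of clamped-mask ORs
theorem pix_eq_byte (row x2 : Int) :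
    ∀ (k : Nat) (x1 : Int) (scr : List Int), x1 ≤ x2 → k = (x2 / 8 - x1 / 8).toNat →
      -(scr.length : Int) ≤ row + x1 / 8 → row + x2 / 8 < (scr.length : Int) →
      (PySem.List.pyRange x1 (x2 + 1) 1).foldl (pixF row) scr
        = (PySem.List.pyRange (x1 / 8) (x2 / 8 + 1) 1).foldl (byteF row x1 x2) scr := by
  intro k
  induction k with
  | zero =>
    intro x1 scr h12 hk hlo hhi
    have hse : x1 / 8 = x2 / 8 := by omega
    have hIR : PySem.Raise.InRange scr.length (row + x1 / 8) := ⟨by omega, by omega⟩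
    -- all pixels lie in byte x1/8
    have hcong : (PySem.List.pyRange x1 (x2 + 1) 1).foldl (pixF row) scr
        = (PySem.List.pyRange x1 (x2 + 1) 1).foldl
            (fun sc x =>
              PySem.List.pySetD sc (row + x1 / 8)
                (PySem.Int.bor (PySem.List.pyGetD sc (row + x1 / 8) 0)
                  ((1 : Int) <<< (7 - x % 8).toNat))) scr := by
      refine PySem.List.foldl_congr_mem _ _ _ scr (fun sc x hx => ?_)
      have hx' := (PySem.List.mem_pyRange_one).1 hx
      simp only [pixF]; rw [show x / 8 = x1 / 8 by omega, Int.shiftLeft_natCast_right]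
    rw [hcong, chunk (row + x1 / 8) (x1 / 8) x2 (x2 - x1).toNat x1 scr
      (by omega) (by omega) (by omega) hIR]
    rw [hse, PySem.List.pyRange_one_singleton, List.foldl_cons, List.foldl_nil]
    simp only [byteF]
    rw [show min x2 (8 * (x2 / 8) + 7) = x2 by omega,
      show max x1 (8 * (x2 / 8)) = x1 by omega,
      show ((x2 - x1).toNat + 1) = (x2 - x1 + 1).toNat by omega]
  | succ k ih =>
    intro x1 scr h12 hk hlo hhi
    have hse : x1 / 8 < x2 / 8 := by omega
    have h8 : 8 * (x1 / 8) ≤ x1 ∧ x1 < 8 * (x1 / 8) + 8 := by omega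
    have hx2big : 8 * (x1 / 8 + 1) ≤ x2 := by omega
    have hIR : PySem.Raise.InRange scr.length (row + x1 / 8) := ⟨by omega, by omega⟩
    -- split the pixel range at the next byte boundary
    rw [PySem.List.pyRange_one_append x1 (8 * (x1 / 8 + 1)) (x2 + 1) (by omega) (by omega),
      List.foldl_append]
    -- first segment: the pixels of byte x1/8
    have hcong : ∀ init : List Int,
        (PySem.List.pyRange x1 (8 * (x1 / 8 + 1)) 1).foldl (pixF row) init
        = (PySem.List.pyRange x1 (8 * (x1 / 8 + 1)) 1).foldl
            (fun sc x =>
              PySem.List.pySetD sc (row + x1 / 8)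
                (PySem.Int.bor (PySem.List.pyGetD sc (row + x1 / 8) 0)
                  ((1 : Int) <<< (7 - x % 8).toNat))) init := by
      intro init
      refine PySem.List.foldl_congr_mem _ _ _ init (fun sc x hx => ?_)
      have hx' := (PySem.List.mem_pyRange_one).1 hx
      simp only [pixF]; rw [show x / 8 = x1 / 8 by omega, Int.shiftLeft_natCast_right]
    rw [hcong, show 8 * (x1 / 8 + 1) = (8 * (x1 / 8) + 7) + 1 by ring,
      chunk (row + x1 / 8) (x1 / 8) (8 * (x1 / 8) + 7) ((8 * (x1 / 8) + 7) - x1).toNat x1 scr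
        (by omega) (by omega) (by omega) hIR]
    -- that one write is byteF at byte x1/8
    have hfirst : PySem.List.pySetD scr (row + x1 / 8)
        (PySem.Int.bor (PySem.List.pyGetD scr (row + x1 / 8) 0)
          ((((1 : Int) <<< (((8 * (x1 / 8) + 7) - x1).toNat + 1)) - 1) <<<
            (7 - (8 * (x1 / 8) + 7) % 8).toNat))
        = byteF row x1 x2 scr (x1 / 8) := by
      simp only [byteF]
      rw [show min x2 (8 * (x1 / 8) + 7) = 8 * (x1 / 8) + 7 by omega,
        show max x1 (8 * (x1 / 8)) = x1 by omega,
        show ((8 * (x1 / 8) + 7) - x1).toNat + 1 = (8 * (x1 / 8) + 7 - x1 + 1).toNat by omega]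
    rw [hfirst]
    -- second segment: induction hypothesis at x1' = 8*(x1/8+1)
    set scr1 := byteF row x1 x2 scr (x1 / 8) with hscr1
    have hlen1 : scr1.length = scr.length := byteF_length _ _ _ _ _
    have hdiv : 8 * (x1 / 8 + 1) / 8 = x1 / 8 + 1 := by omega
    have hih := ih (8 * (x1 / 8 + 1)) scr1 (by omega) (by omega)
      (by rw [hlen1, hdiv]; omega) (by rw [hlen1]; omega)
    rw [show (8 * (x1 / 8) + 7) + 1 = 8 * (x1 / 8 + 1) by ring, hih, hdiv]
    -- the remaining per-byte steps do not depend on the exact x1 within an earlier byte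
    have hcong2 : (PySem.List.pyRange (x1 / 8 + 1) (x2 / 8 + 1) 1).foldl
        (byteF row (8 * (x1 / 8 + 1)) x2) scr1
        = (PySem.List.pyRange (x1 / 8 + 1) (x2 / 8 + 1) 1).foldl (byteF row x1 x2) scr1 := by
      refine PySem.List.foldl_congr_mem _ _ _ scr1 (fun sc b hb => ?_)
      have hb' := (PySem.List.mem_pyRange_one).1 hb
      simp only [byteF]
      rw [show max (8 * (x1 / 8 + 1)) (8 * b) = max x1 (8 * b) by omega]
    rw [hcong2]
    -- the byte fold also starts with byte x1/8
    rw [PySem.List.pyRange_one_cons (by omega : x1 / 8 < x2 / 8 + 1), List.foldl_cons, ← hscr1]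

-- the per-byte OR fold equals drawBytes' fold: a middle byte holds a byte value, so v ||| 255 = 255
theorem byte_eq_draw (row x1 x2 : Int) (n : Nat) (mids : List Int)
    (hmIR : ∀ b' ∈ mids, PySem.Raise.InRange n (row + b'))
    (hmids : ∀ b : Int, x1 / 8 < b ∧ b < x2 / 8 → b ∈ mids) :
    ∀ (l : List Int) (scr : List Int), scr.length = n →
      (∀ b ∈ l, x1 ≤ 8 * b + 7 ∧ 8 * b ≤ x2 ∧ PySem.Raise.InRange n (row + b)) →
      (∀ b' ∈ mids, 0 ≤ PySem.List.pyGetD scr (row + b') 0 ∧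
        PySem.List.pyGetD scr (row + b') 0 < 256) →
      l.foldl (byteF row x1 x2) scr
        = l.foldl (fun scr b =>
            if x1 / 8 < b ∧ b < x2 / 8 then
              PySem.List.pySetD scr (row + b) 255
            else
              PySem.List.pySetD scr (row + b)
                (PySem.Int.bor (PySem.List.pyGetD scr (row + b) 0)
                  ((((1 : Int) <<< (min x2 (8 * b + 7) - max x1 (8 * b) + 1).toNat) - 1) <<<
                    (7 - (min x2 (8 * b + 7)) % 8).toNat))) scr := by
  intro l
  induction l with
  | nil => intro scr _ _ _; rfl
  | cons b l ihl =>
    intro scr hlen hb hscr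
    obtain ⟨hb1, hb2, hbIR⟩ := hb b List.mem_cons_self
    have hbIR' : PySem.Raise.InRange scr.length (row + b) := by rw [hlen]; exact hbIR
    rw [List.foldl_cons, List.foldl_cons]
    have hmask := maskBound (min x2 (8 * b + 7) - max x1 (8 * b) + 1).toNat
      (7 - (min x2 (8 * b + 7)) % 8).toNat (by omega)
    have hstep : (if x1 / 8 < b ∧ b < x2 / 8 then
          PySem.List.pySetD scr (row + b) 255
        else
          PySem.List.pySetD scr (row + b)
            (PySem.Int.bor (PySem.List.pyGetD scr (row + b) 0)
              ((((1 : Int) <<< (min x2 (8 * b + 7) - max x1 (8 * b) + 1).toNat) - 1) <<<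
                (7 - (min x2 (8 * b + 7)) % 8).toNat))) = byteF row x1 x2 scr b := by
      by_cases hmid : x1 / 8 < b ∧ b < x2 / 8
      · rw [if_pos hmid]; simp only [byteF]
        have hmin : min x2 (8 * b + 7) = 8 * b + 7 := by omega
        have hmax : max x1 (8 * b) = 8 * b := by omega
        rw [hmin, hmax,
          show (8 * b + 7 - 8 * b + 1).toNat = 8 by omega,
          show (7 - (8 * b + 7) % 8).toNat = 0 by omega]
        have hval := hscr b (hmids b hmid)
        rw [show ((((1 : Int) <<< (8 : Nat)) - 1) <<< (0 : Nat)) = 255 by decide,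
          PySem.Int.bor_comm, bor_255 _ hval.1 hval.2]
      · rw [if_neg hmid]; simp only [byteF]
    rw [hstep]
    -- the invariant survives the write: a write is 255 or an OR of byte values
    refine ihl (byteF row x1 x2 scr b) (by rw [byteF_length, hlen])
      (fun b' hb' => hb b' (List.mem_cons_of_mem _ hb')) (fun b' hb' => ?_)
    have hIR' : PySem.Raise.InRange scr.length (row + b') := by rw [hlen]; exact hmIR b' hb'
    have hval' := hscr b' hb'
    simp only [byteF]
    rw [pyGetD_pySetD_wrap scr (row + b) (row + b') _ 0 hbIR' hIR']
    by_cases hcol : pvPos scr.length (row + b) = pvPos scr.length (row + b')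
    · rw [if_pos hcol]
      have hveq : PySem.List.pyGetD scr (row + b) 0 = PySem.List.pyGetD scr (row + b') 0 :=
        pyGetD_pos_eq scr (row + b) (row + b') 0 hbIR' hIR' hcol
      rw [hveq]
      exact bor_lt_256 _ _ hval'.1 hval'.2 hmask.1 hmask.2
    · rw [if_neg hcol]
      exact hval'

-- B equals the byte-at-a-time intermediate on Pre_
theorem alt_eq_drawBytes (screen : List Int) (width x1 x2 y : Int)
    (hpre : Pre_draw_line screen width x1 x2 y) :
    draw_line_alt screen width x1 x2 y = drawBytes screen width x1 x2 y := by
  obtain ⟨h12, hlo, hhi, hv⟩ := hpre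
  simp only [PySem.Int.floordiv_eq_ediv_of_pos (show (0 : Int) < 8 by norm_num)] at hlo hhi hv
  unfold draw_line_alt drawBytes
  simp only [PySem.Int.floordiv_eq_ediv_of_pos (show (0 : Int) < 8 by norm_num),
    PySem.Int.mod_eq_emod_of_pos (show (0 : Int) < 8 by norm_num)]
  rw [if_neg (by omega : ¬x2 < x1), if_neg (by omega : ¬x2 < x1)]
  have hpix : (PySem.List.pyRange x1 (x2 + 1) 1).foldl
      (fun scr x =>
        PySem.List.pySetD scr (width / 8 * y + x / 8)
          (PySem.Int.bor (PySem.List.pyGetD scr (width / 8 * y + x / 8) 0)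
            ((1 : Int) <<< (7 - x % 8).toNat))) screen
      = (PySem.List.pyRange x1 (x2 + 1) 1).foldl (pixF (width / 8 * y)) screen := by
    refine PySem.List.foldl_congr_mem _ _ _ screen (fun sc x _ => ?_)
    simp only [pixF]
  rw [hpix, pix_eq_byte (width / 8 * y) x2 (x2 / 8 - x1 / 8).toNat x1 screen h12 rfl hlo hhi]
  exact byte_eq_draw (width / 8 * y) x1 x2 screen.length
    (PySem.List.pyRange (x1 / 8 + 1) (x2 / 8) 1)
    (fun b' hb' => by
      have := (PySem.List.mem_pyRange_one).1 hb'
      constructor <;> omega)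
    (fun b hbmid => (PySem.List.mem_pyRange_one).2 (by omega))
    (PySem.List.pyRange (x1 / 8) (x2 / 8 + 1) 1) screen rfl
    (fun b hb => by
      have hb' := (PySem.List.mem_pyRange_one).1 hb
      exact ⟨by omega, by omega, by constructor <;> omega⟩)
    (fun b' hb' => hv b' hb')

-- ==== A equals the byte-at-a-time intermediate (write-order argument) ====

-- the 255-run: length and element characterisation of the fold of sets
theorem fold_set_len (f : Int → Nat) (l : List Int) :
    ∀ scr : List Int, (l.foldl (fun sc i => sc.set (f i) 255) scr).length = scr.length := by
  induction l with
  | nil => intro scr; rfl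
  | cons i l ih => intro scr; rw [List.foldl_cons, ih]; simp

theorem fold_set_char (f : Int → Nat) (l : List Int) :
    ∀ (scr : List Int), (∀ i ∈ l, f i < scr.length) → ∀ t : Nat,
      (l.foldl (fun sc i => sc.set (f i) 255) scr)[t]?
        = if ∃ i ∈ l, f i = t then some 255 else scr[t]? := by
  induction l with
  | nil => intro scr _ t; simp
  | cons i l ih =>
    intro scr h t
    have hfi : f i < scr.length := h i List.mem_cons_self
    rw [List.foldl_cons, ih _ (fun j hj => by simpa using h j (List.mem_cons_of_mem _ hj)) t]
    by_cases h1 : ∃ x ∈ l, f x = t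
    · simp [h1]
    · by_cases h2 : f i = t
      · simp [h1, h2, List.getElem?_set_self (h2 ▸ hfi)]
      · simp [h1, h2, List.getElem?_set_ne h2]

-- A's middle loop of pySetD writes, normalised to List.set at wrapped positions
theorem foldl_pySetD_char (q : Int) (l : List Int) :
    ∀ scr : List Int, (∀ i ∈ l, PySem.Raise.InRange scr.length (q + i)) →
      l.foldl (fun sc i => PySem.List.pySetD sc (q + i) 255) scr
        = l.foldl (fun sc i => sc.set (pvPos scr.length (q + i)) 255) scr := by
  induction l with
  | nil => intro scr _; rfl
  | cons i l ih =>
    intro scr h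
    rw [List.foldl_cons, List.foldl_cons, pySetD_inRange scr (q + i) 255 (h i List.mem_cons_self)]
    have := ih (scr.set (pvPos scr.length (q + i)) 255)
      (fun j hj => by simpa using h j (List.mem_cons_of_mem _ hj))
    simpa using this

-- the multi-byte core: A's write order (middles, then the two end ORs) equals drawBytes' order
-- (start OR, middles, end OR), at wrapped positions, for any mask mS with 255 | mS = 255
theorem wrap_main (q a b mS mE : Int) (l : List Int) (scr : List Int)
    (hbS : PySem.Int.bor 255 mS = 255)
    (hIRa : PySem.Raise.InRange scr.length a) (hIRb : PySem.Raise.InRange scr.length b)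
    (hIRl : ∀ i ∈ l, PySem.Raise.InRange scr.length (q + i)) :
    (PySem.List.pySetD
      (PySem.List.pySetD (l.foldl (fun sc i => PySem.List.pySetD sc (q + i) 255) scr) a
        (PySem.Int.bor (PySem.List.pyGetD (l.foldl (fun sc i => PySem.List.pySetD sc (q + i) 255) scr) a 0) mS)) b
      (PySem.Int.bor
        (PySem.List.pyGetD
          (PySem.List.pySetD (l.foldl (fun sc i => PySem.List.pySetD sc (q + i) 255) scr) a
            (PySem.Int.bor (PySem.List.pyGetD (l.foldl (fun sc i => PySem.List.pySetD sc (q + i) 255) scr) a 0) mS)) b 0) mE))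
    = (PySem.List.pySetD
        (l.foldl (fun sc i => PySem.List.pySetD sc (q + i) 255)
          (PySem.List.pySetD scr a (PySem.Int.bor (PySem.List.pyGetD scr a 0) mS))) b
        (PySem.Int.bor
          (PySem.List.pyGetD
            (l.foldl (fun sc i => PySem.List.pySetD sc (q + i) 255)
              (PySem.List.pySetD scr a (PySem.Int.bor (PySem.List.pyGetD scr a 0) mS))) b 0) mE)) := by
  rw [pySetD_inRange scr a _ hIRa, pyGetD_inRange scr a 0 hIRa,
    foldl_pySetD_char q l scr hIRl,
    foldl_pySetD_char q l _ (fun i hi => by simpa using hIRl i hi)]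
  simp only [List.length_set]
  have hPlt : pvPos scr.length a < scr.length := pvPos_lt _ _ hIRa
  have hRlt : pvPos scr.length b < scr.length := pvPos_lt _ _ hIRb
  have hFlt : ∀ i ∈ l, pvPos scr.length (q + i) < scr.length :=
    fun i hi => pvPos_lt _ _ (hIRl i hi)
  have hl1 : (l.foldl (fun sc i => sc.set (pvPos scr.length (q + i)) 255) scr).length
      = scr.length := fold_set_len _ l scr
  have hl2 : (l.foldl (fun sc i => sc.set (pvPos scr.length (q + i)) 255)
      (scr.set (pvPos scr.length a)
        (PySem.Int.bor ((scr[pvPos scr.length a]?).getD 0) mS))).length = scr.length := by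
    rw [fold_set_len _ l]; simp
  have hchar1 : ∀ u : Nat,
      (l.foldl (fun sc i => sc.set (pvPos scr.length (q + i)) 255) scr)[u]?
        = if ∃ i ∈ l, pvPos scr.length (q + i) = u then some 255 else scr[u]? :=
    fold_set_char _ l scr hFlt
  have hchar2 : ∀ u : Nat,
      (l.foldl (fun sc i => sc.set (pvPos scr.length (q + i)) 255)
        (scr.set (pvPos scr.length a)
          (PySem.Int.bor ((scr[pvPos scr.length a]?).getD 0) mS)))[u]?
        = if ∃ i ∈ l, pvPos scr.length (q + i) = u then some 255
          else (scr.set (pvPos scr.length a)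
            (PySem.Int.bor ((scr[pvPos scr.length a]?).getD 0) mS))[u]? :=
    fold_set_char _ l _ (fun i hi => by simpa using hFlt i hi)
  rw [pyGetD_inRange _ a 0 (by rw [hl1]; exact hIRa)]
  simp only [hl1]
  rw [hchar1 (pvPos scr.length a),
    pySetD_inRange _ a _ (by rw [hl1]; exact hIRa)]
  simp only [hl1]
  rw [pyGetD_inRange _ b 0 (by rw [List.length_set, hl1]; exact hIRb)]
  simp only [List.length_set, hl1]
  rw [pyGetD_inRange _ b 0 (by rw [hl2]; exact hIRb)]
  simp only [hl2]
  rw [pySetD_inRange _ b _ (by rw [List.length_set, hl1]; exact hIRb)]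
  simp only [List.length_set, hl1]
  rw [pySetD_inRange _ b _ (by rw [hl2]; exact hIRb)]
  simp only [hl2]
  apply List.ext_getElem?
  intro t
  simp only [List.getElem?_set, hchar1, hchar2, List.length_set, hl1, hl2]
  clear hchar1 hchar2 hl1 hl2 hIRa hIRb hIRl hFlt
  by_cases hRt : pvPos scr.length b = t <;>
    by_cases hPt : pvPos scr.length a = t <;>
      by_cases hHt : (∃ i ∈ l, pvPos scr.length (q + i) = t) <;>
        simp [hRt, hPt, hHt, hbS] <;>
          (have ht : t < scr.length := by omega
           simp [ht])

theorem endmask_eq (em : Int) (h0 : 0 ≤ em) (h8 : em < 8) :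
    PySem.Int.bxor 255 (((1 : Int) <<< (8 - em - 1).toNat) - 1)
      = (((1 : Int) <<< (em + 1).toNat) - 1) <<< (7 - em).toNat := by
  interval_cases em <;> decide

set_option maxHeartbeats 1000000 in
theorem draw_line_eq (screen : List Int) (width x1 x2 y : Int)
    (h12 : x1 ≤ x2)
    (hlo : -(screen.length : Int) ≤ PySem.Int.floordiv width 8 * y + PySem.Int.floordiv x1 8)
    (hhi : PySem.Int.floordiv width 8 * y + PySem.Int.floordiv x2 8 < screen.length) :
    draw_line screen width x1 x2 y = drawBytes screen width x1 x2 y := by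
  simp only [PySem.Int.floordiv_eq_ediv_of_pos (show (0 : Int) < 8 by norm_num)] at hlo hhi
  unfold draw_line drawBytes
  simp only [PySem.Int.floordiv_eq_ediv_of_pos (show (0 : Int) < 8 by norm_num),
    PySem.Int.mod_eq_emod_of_pos (show (0 : Int) < 8 by norm_num)]
  rw [if_neg (by omega : ¬x2 < x1)]
  set q : Int := width / 8 * y with hq
  set s : Int := x1 / 8 with hs
  set e : Int := x2 / 8 with he
  have hse : s ≤ e := by omega
  by_cases hcase : s = e
  · rw [if_pos hcase, ← hcase, PySem.List.pyRange_one_singleton, List.foldl_cons, List.foldl_nil,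
      if_neg (by omega : ¬(s < s ∧ s < s)),
      show min x2 (8 * s + 7) = x2 by omega,
      show max x1 (8 * s) = x1 by omega,
      show (x2 - x1 + 1).toNat = (x2 % 8 - x1 % 8 + 1).toNat by omega,
      show (7 - x2 % 8).toNat = (8 - x2 % 8 - 1).toNat by omega]
  · rw [if_neg hcase]
    have hselt : s < e := lt_of_le_of_ne hse hcase
    have h8s : 8 * s ≤ x1 ∧ x1 ≤ 8 * s + 7 := by omega
    have h8e : 8 * e ≤ x2 ∧ x2 ≤ 8 * e + 7 := by omega
    -- split drawBytes' range  [s, e+1)  =  [s] ++ [s+1, e) ++ [e]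
    rw [PySem.List.pyRange_one_append s (s + 1) (e + 1) (by omega) (by omega),
      PySem.List.pyRange_one_singleton,
      PySem.List.pyRange_one_succ_right (by omega : s + 1 ≤ e),
      List.foldl_append, List.foldl_append, List.foldl_cons, List.foldl_nil,
      List.foldl_cons, List.foldl_nil]
    -- drawBytes' first step (b = s) is A's start-byte OR
    rw [if_neg (by omega : ¬(s < s ∧ s < e)),
      show max x1 (8 * s) = x1 by omega,
      show min x2 (8 * s + 7) = 8 * s + 7 by omega,
      show (8 * s + 7) % 8 = 7 by omega,
      show ((7 : Int) - 7).toNat = 0 by norm_num,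
      show (8 * s + 7 - x1 + 1).toNat = (8 - x1 % 8).toNat by omega]
    simp only [Int.shiftLeft_zero]
    -- drawBytes' last step (b = e) is A's end-byte OR
    rw [if_neg (by omega : ¬(s < e ∧ e < e)),
      show max x1 (8 * e) = 8 * e by omega,
      show min x2 (8 * e + 7) = x2 by omega,
      show (x2 - 8 * e + 1).toNat = (x2 % 8 + 1).toNat by omega,
      ← endmask_eq (x2 % 8) (by omega) (by omega)]
    -- drawBytes' middle steps are plain 255-assignments
    have hmem : ∀ i ∈ PySem.List.pyRange (s + 1) e 1, s + 1 ≤ i ∧ i < e := by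
      intro i hi; exact (PySem.List.mem_pyRange_one).1 hi
    have hBmid : ∀ init : List Int,
        List.foldl (fun scr b =>
          if s < b ∧ b < e then PySem.List.pySetD scr (q + b) 255
          else
            PySem.List.pySetD scr (q + b)
              (PySem.Int.bor (PySem.List.pyGetD scr (q + b) 0)
                ((((1 : Int) <<< (min x2 (8 * b + 7) - max x1 (8 * b) + 1).toNat) - 1) <<<
                  (7 - (min x2 (8 * b + 7)) % 8).toNat)))
          init (PySem.List.pyRange (s + 1) e 1)
        = List.foldl (fun scr b => PySem.List.pySetD scr (q + b) 255) init
            (PySem.List.pyRange (s + 1) e 1) := by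
      intro init
      refine PySem.List.foldl_congr_mem _ _ _ init (fun scr b hb => ?_)
      have hb' := hmem b hb
      rw [if_pos (by omega : s < b ∧ b < e)]
    rw [hBmid]
    have hmask := startmask_bound (8 - x1 % 8).toNat (by omega)
    exact wrap_main q (q + s) (q + e) ((1 : Int) <<< (8 - x1 % 8).toNat - 1)
      (PySem.Int.bxor 255 ((1 : Int) <<< (8 - x2 % 8 - 1).toNat - 1))
      (PySem.List.pyRange (s + 1) e 1) screen
      (bor_255 _ hmask.1 hmask.2)
      ⟨by omega, by omega⟩ ⟨by omega, by omega⟩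
      (fun i hi => ⟨by have := hmem i hi; omega, by have := hmem i hi; omega⟩)

-- ===== VERDICT (by name: the statement is the Claim_ definition above) =====
theorem draw_line_spec : Claim_equal_draw_line := by
  intro screen width x1 x2 y _ hpre
  unfold Spec_draw_line
  obtain ⟨h12, hlo, hhi, hv⟩ := hpre
  rw [draw_line_eq screen width x1 x2 y h12 hlo hhi,
    alt_eq_drawBytes screen width x1 x2 y ⟨h12, hlo, hhi, hv⟩]
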